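-- pv_equiv track=rewrite | github.com/GouravYadavv/GFG_problems | Medium/Array Pair Sum Divisibility Problem/array-pair-sum-divisibility-problem.py | canPair
-- ===== SOURCE A (Python) =====
-- def canPair(nums, k):
--     # Code here
--     if len(nums)<4 or sum(nums)/2<k:
--         return False
--     d={}
--     for i in nums:
--         if i%k in d:
--             d[i%k]+=1
--         else:
--             d[i%k]=1
--     for i in d:
--         if i==0:
--             if d[i]%2!=0:
--                 return False
--         elif k%2==0 and i==k//2:
--             if d[i]%2!=0:
--                 return False
--         elif k-i in d:
--             if d[i]!=d[k-i]:
--                 return False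
--         else:
--             return False
--     return True
-- ===== SOURCE B (Python) =====
-- def canPair(nums, k):
--     if len(nums) < 4 or sum(nums)/2 < k:
--         return False
--     pending = {}
--     for i in nums:
--         r = i % k
--         c = (k - r) % k
--         if pending.get(c, 0) > 0:
--             pending[c] -= 1
--         else:
--             pending[r] = pending.get(r, 0) + 1
--     return all(v == 0 for v in pending.values())
-- ===== Notes on version B (the rewrite author's own statement) =====
-- stated objective: alternative
-- what changed: A builds a complete residue histogram and then audits it key by key (even counts at the self-paired residues, equal counts at symmetric pairs); B keeps the same guard but does a single pass that matches each element against a pending complement-residue entry online and finally checks all pending counts are zero.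
import Mathlib
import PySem

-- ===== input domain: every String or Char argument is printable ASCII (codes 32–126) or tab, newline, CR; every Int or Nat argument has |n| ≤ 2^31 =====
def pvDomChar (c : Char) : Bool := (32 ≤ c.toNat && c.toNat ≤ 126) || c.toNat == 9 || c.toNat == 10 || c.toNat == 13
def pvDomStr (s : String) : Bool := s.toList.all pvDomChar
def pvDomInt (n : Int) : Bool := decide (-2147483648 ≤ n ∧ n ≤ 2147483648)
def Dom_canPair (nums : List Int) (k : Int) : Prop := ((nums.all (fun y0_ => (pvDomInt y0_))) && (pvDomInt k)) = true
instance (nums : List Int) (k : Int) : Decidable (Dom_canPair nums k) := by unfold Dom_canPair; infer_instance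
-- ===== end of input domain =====

-- B replaces A's build-full-histogram-then-audit-symmetric-keys with a single-pass online
-- cancellation of complement residues (alternative decomposition, same asymptotic cost).

-- ===== PORT A =====
-- second loop of A: 'for i in d: …' with early returns, over the list of keys
def canPairCheck (d : PySem.Dict Int Int) (k : Int) : List Int → Bool
  | [] => true
  | i :: rest =>
    if i = 0 then
      if PySem.Int.mod (d.getD i 0) 2 ≠ 0 then false else canPairCheck d k rest
    else if PySem.Int.mod k 2 = 0 ∧ i = PySem.Int.floordiv k 2 then
      if PySem.Int.mod (d.getD i 0) 2 ≠ 0 then false else canPairCheck d k rest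
    else if d.contains (k - i) then
      if d.getD i 0 ≠ d.getD (k - i) 0 then false else canPairCheck d k rest
    else false

-- Python's guard 'sum(nums)/2 < k' (float) is ported as 'nums.sum < 2*k': exact on Dom
-- (|elements| ≤ 2^31: a sum near 2k is exactly representable, a huge sum is far from 2k).
def canPair (nums : List Int) (k : Int) : Bool :=
  if nums.length < 4 ∨ nums.sum < 2 * k then false
  else
    let d := nums.foldl (fun d i =>
      if d.contains (PySem.Int.mod i k) then
        d.insert (PySem.Int.mod i k) (d.getD (PySem.Int.mod i k) 0 + 1)
      else d.insert (PySem.Int.mod i k) 1) PySem.Dict.empty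
    canPairCheck d k d.keys

-- ===== PORT B =====
def canPair_alt (nums : List Int) (k : Int) : Bool :=
  if nums.length < 4 ∨ nums.sum < 2 * k then false
  else
    let pending := nums.foldl (fun p i =>
      let r := PySem.Int.mod i k
      let c := PySem.Int.mod (k - r) k
      if p.getD c 0 > 0 then p.insert c (p.getD c 0 - 1)
      else p.insert r (p.getD r 0 + 1)) (PySem.Dict.empty : PySem.Dict Int Int)
    pending.values.all (fun v => v == 0)

-- ===== PRECONDITION & SPEC =====
-- Pre_ excludes exactly the inputs on which A raises ZeroDivisionError at 'i % k'
-- (k = 0 with len(nums) ≥ 4 and sum(nums) ≥ 0, so the guard does not return first); B raises there too.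
def Pre_canPair (nums : List Int) (k : Int) : Prop := k ≠ 0 ∨ nums.length < 4 ∨ nums.sum < 0
instance (nums : List Int) (k : Int) : Decidable (Pre_canPair nums k) := by unfold Pre_canPair; infer_instance
def pvWitness_canPair : List Int × Int := ([1, 3, 2, 2], 4)

def Spec_canPair (nums : List Int) (k : Int) (out : Bool) : Prop := out = canPair_alt nums k
instance (nums : List Int) (k : Int) (out : Bool) : Decidable (Spec_canPair nums k out) := by unfold Spec_canPair; infer_instance

-- ===== CLAIM (what is proved, stated in full; the proofs are below) =====
def Claim_equal_canPair : Prop := ∀ (nums : List Int) (k : Int), Dom_canPair nums k → Pre_canPair nums k → Spec_canPair nums k (canPair nums k)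

-- ===== LEMMAS AND PROOFS =====

-- ---- Python-mod toolkit (k of either sign) ----
def ModRange (k s : Int) : Prop := (0 < k ∧ 0 ≤ s ∧ s < k) ∨ (k < 0 ∧ k < s ∧ s ≤ 0)

lemma mod_range (a k : Int) (hk : k ≠ 0) : ModRange k (PySem.Int.mod a k) := by
  rcases lt_or_gt_of_ne hk with h | h
  · exact Or.inr ⟨h, (PySem.Int.mod_neg_bounds a h).1, (PySem.Int.mod_neg_bounds a h).2⟩
  · exact Or.inl ⟨h, PySem.Int.mod_nonneg a h, PySem.Int.mod_lt a h⟩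

lemma dvd_sub_mod (a k : Int) : k ∣ a - PySem.Int.mod a k := by
  refine ⟨PySem.Int.floordiv a k, ?_⟩
  have h := PySem.Int.floordiv_mul_add_mod a k
  have hc : PySem.Int.floordiv a k * k = k * PySem.Int.floordiv a k := mul_comm _ _
  linarith

lemma mod_unique (a s k : Int) (hk : k ≠ 0) (hdvd : k ∣ a - s) (hr : ModRange k s) :
    PySem.Int.mod a k = s := by
  have h1 := mod_range a k hk
  have h2 := dvd_sub_mod a k
  have h3 : k ∣ PySem.Int.mod a k - s := by
    have h4 := dvd_sub hdvd h2
    have h5 : a - s - (a - PySem.Int.mod a k) = PySem.Int.mod a k - s := by ring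
    rwa [h5] at h4
  obtain ⟨c, hc⟩ := h3
  have hc0 : c = 0 := by
    by_contra hne
    rcases h1 with ⟨hkp, hm1, hm2⟩ | ⟨hkn, hm1, hm2⟩ <;>
      rcases hr with ⟨hkp', hs1, hs2⟩ | ⟨hkn', hs1, hs2⟩ <;>
      rcases lt_or_gt_of_ne hne with hcn | hcp
    · have := mul_le_mul_of_nonneg_left (show c ≤ -1 by omega) hkp.le
      linarith
    · have := mul_le_mul_of_nonneg_left (show (1:Int) ≤ c by omega) hkp.le
      linarith
    · omega
    · omega
    · omega
    · omega
    · have := mul_le_mul_of_nonneg_left (show c ≤ -1 by omega) (show (0:Int) ≤ -k by omega)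
      nlinarith
    · have := mul_le_mul_of_nonneg_left (show (1:Int) ≤ c by omega) (show (0:Int) ≤ -k by omega)
      nlinarith
  rw [hc0, mul_zero] at hc
  omega

lemma mod_eq_self (s k : Int) (hk : k ≠ 0) (hr : ModRange k s) : PySem.Int.mod s k = s :=
  mod_unique s s k hk ⟨0, by ring⟩ hr

lemma mod_idem (a k : Int) (hk : k ≠ 0) :
    PySem.Int.mod (PySem.Int.mod a k) k = PySem.Int.mod a k :=
  mod_eq_self _ _ hk (mod_range a k hk)

lemma mod_k_self (k : Int) (hk : k ≠ 0) : PySem.Int.mod k k = 0 := by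
  refine mod_unique k 0 k hk ⟨1, by ring⟩ ?_
  rcases lt_or_gt_of_ne hk with h | h
  · exact Or.inr ⟨h, h, le_refl 0⟩
  · exact Or.inl ⟨h, le_refl 0, h⟩

lemma mod_sub_mod (k a : Int) (hk : k ≠ 0) :
    PySem.Int.mod (k - PySem.Int.mod a k) k = PySem.Int.mod (k - a) k := by
  refine mod_unique _ _ _ hk ?_ (mod_range _ _ hk)
  have h1 := dvd_sub_mod a k
  have h2 := dvd_sub_mod (k - a) k
  have h5 : k - PySem.Int.mod a k - PySem.Int.mod (k - a) k
      = (k - a - PySem.Int.mod (k - a) k) + (a - PySem.Int.mod a k) := by ring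
  rw [h5]; exact dvd_add h2 h1

-- complement residue
def cOf (k v : Int) : Int := PySem.Int.mod (k - v) k

lemma cOf_cOf (k r : Int) (hk : k ≠ 0) (hr : PySem.Int.mod r k = r) : cOf k (cOf k r) = r := by
  unfold cOf
  rw [mod_sub_mod k (k - r) hk]
  simpa using hr

lemma cOf_zero (k : Int) (hk : k ≠ 0) : cOf k 0 = 0 := by
  unfold cOf; simpa using mod_k_self k hk

-- for a nonzero residue r, the complement key is k - r (A's 'k - i')
lemma cOf_nonzero (k r : Int) (hk : k ≠ 0) (hr : PySem.Int.mod r k = r) (hr0 : r ≠ 0) :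
    cOf k r = k - r := by
  have hrr : ModRange k r := hr ▸ mod_range r k hk
  refine mod_eq_self _ _ hk ?_
  rcases hrr with ⟨hkp, h1, h2⟩ | ⟨hkn, h1, h2⟩
  · exact Or.inl ⟨hkp, by omega, by omega⟩
  · exact Or.inr ⟨hkn, by omega, by omega⟩

-- 'k % 2 == 0 and r == k // 2'  ↔  k = 2r
lemma half_iff (k r : Int) :
    (PySem.Int.mod k 2 = 0 ∧ r = PySem.Int.floordiv k 2) ↔ k = 2 * r := by
  constructor
  · rintro ⟨he, hq⟩
    have h := PySem.Int.floordiv_mul_add_mod k 2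
    omega
  · intro hkr
    have he : PySem.Int.mod k 2 = 0 := by
      rw [(PySem.Int.mod_eq_zero_iff_dvd k 2)]; exact ⟨r, hkr⟩
    refine ⟨he, ?_⟩
    have h := (PySem.Int.floordiv_eq_iff_of_pos (a := k) (b := 2) (q := r) (by norm_num)).mpr
      (by omega)
    omega

-- ---- A-side characterisation ----
def condA (d : PySem.Dict Int Int) (k i : Int) : Bool :=
  if i = 0 then PySem.Int.mod (d.getD i 0) 2 = 0
  else if PySem.Int.mod k 2 = 0 ∧ i = PySem.Int.floordiv k 2 then PySem.Int.mod (d.getD i 0) 2 = 0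
  else if d.contains (k - i) then d.getD i 0 = d.getD (k - i) 0
  else false

lemma checkKeys_eq_all (d : PySem.Dict Int Int) (k : Int) (l : List Int) :
    canPairCheck d k l = l.all (condA d k) := by
  induction l with
  | nil => rfl
  | cons x rest ih =>
    simp only [canPairCheck, condA, List.all_cons]
    split_ifs <;> simp_all

lemma dA_eq_counter (nums : List Int) (k : Int) :
    nums.foldl (fun d i =>
      if d.contains (PySem.Int.mod i k) then
        d.insert (PySem.Int.mod i k) (d.getD (PySem.Int.mod i k) 0 + 1)
      else d.insert (PySem.Int.mod i k) 1) PySem.Dict.empty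
    = PySem.Dict.counter (nums.map (fun i => PySem.Int.mod i k)) := by
  rw [← PySem.Dict.foldl_insert_getD_add_one_eq_counter, List.foldl_map]
  apply PySem.List.foldl_congr_mem
  intro acc x _
  by_cases h : acc.contains (PySem.Int.mod x k)
  · simp [h]
  · have h' : acc.contains (PySem.Int.mod x k) = false := by simpa using h
    simp [h, PySem.Dict.getD_of_not_contains _ (0:Int) h']

-- ---- B-side characterisation ----
def pend (res : List Int) (k v : Int) : Int :=
  if cOf k v = v then (res.count v : Int) % 2
  else max ((res.count v : Int) - (res.count (cOf k v) : Int)) 0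

lemma pend_not_mem (res : List Int) (k v : Int) (h : v ∉ res) : pend res k v = 0 := by
  unfold pend
  have h0 : res.count v = 0 := List.count_eq_zero.mpr h
  rw [h0]
  split_ifs
  · omega
  · exact max_eq_right (by omega)

lemma count_app_self (res : List Int) (r : Int) :
    (((res ++ [r]).count r : Nat) : Int) = ((res.count r : Nat) : Int) + 1 := by
  simp [List.count_append]

lemma count_app_ne (res : List Int) (r v : Int) (h : v ≠ r) :
    (((res ++ [r]).count v : Nat) : Int) = ((res.count v : Nat) : Int) := by
  simp [List.count_append, Ne.symm h]

-- appending one copy of r does not move pend at any point other than r and its complement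
lemma pend_append_other (k : Int) (hk : k ≠ 0) (res : List Int)
    (hresfix : ∀ x ∈ res, PySem.Int.mod x k = x) (r v : Int)
    (hv : v ≠ r) (hvc : cOf k r ≠ v) :
    pend (res ++ [r]) k v = pend res k v := by
  unfold pend
  rw [count_app_ne res r v hv]
  by_cases hself : cOf k v = v
  · rw [if_pos hself, if_pos hself]
  · rw [if_neg hself, if_neg hself]
    by_cases hcvr : cOf k v = r
    · by_cases hvfix : PySem.Int.mod v k = v
      · exfalso
        have h2 := cOf_cOf k v hk hvfix
        rw [hcvr] at h2
        exact hvc h2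
      · have hc0 : res.count v = 0 := by
          by_contra h
          exact hvfix (hresfix v (List.count_pos_iff.mp (Nat.pos_of_ne_zero h)))
        rw [hc0]
        have hx : ((0:Nat):Int) - ((res ++ [r]).count (cOf k v) : Int) ≤ 0 := by omega
        have hy : ((0:Nat):Int) - ((res.count (cOf k v) : Nat) : Int) ≤ 0 := by omega
        rw [max_eq_right hx, max_eq_right hy]
    · rw [count_app_ne res r (cOf k v) hcvr]

lemma pending_nodup (k : Int) (nums : List Int) :
    (nums.foldl (fun p i =>
      if p.getD (PySem.Int.mod (k - PySem.Int.mod i k) k) 0 > 0 then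
        p.insert (PySem.Int.mod (k - PySem.Int.mod i k) k)
          (p.getD (PySem.Int.mod (k - PySem.Int.mod i k) k) 0 - 1)
      else p.insert (PySem.Int.mod i k) (p.getD (PySem.Int.mod i k) 0 + 1)) (PySem.Dict.empty : PySem.Dict Int Int)).keys.Nodup := by
  induction nums using List.reverseRecOn with
  | nil => exact PySem.Dict.nodup_keys_empty
  | append_singleton ns i ih =>
    rw [List.foldl_append, List.foldl_cons, List.foldl_nil]
    split_ifs <;> exact PySem.Dict.nodup_keys_insert _ _ _ ih

lemma pending_getD (k : Int) (hk : k ≠ 0) (nums : List Int) (v : Int) :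
    (nums.foldl (fun p i =>
      if p.getD (PySem.Int.mod (k - PySem.Int.mod i k) k) 0 > 0 then
        p.insert (PySem.Int.mod (k - PySem.Int.mod i k) k)
          (p.getD (PySem.Int.mod (k - PySem.Int.mod i k) k) 0 - 1)
      else p.insert (PySem.Int.mod i k) (p.getD (PySem.Int.mod i k) 0 + 1)) (PySem.Dict.empty : PySem.Dict Int Int)).getD v 0
    = pend (nums.map (fun i => PySem.Int.mod i k)) k v := by
  induction nums using List.reverseRecOn generalizing v with
  | nil => simp [pend, PySem.Dict.getD_empty]
  | append_singleton ns i ih =>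
    rw [List.foldl_append, List.foldl_cons, List.foldl_nil, List.map_append, List.map_cons, List.map_nil]
    have hrfix : PySem.Int.mod (PySem.Int.mod i k) k = PySem.Int.mod i k := mod_idem i k hk
    set res : List Int := ns.map (fun i => PySem.Int.mod i k) with hres
    set p : PySem.Dict Int Int := ns.foldl (fun p i =>
      if p.getD (PySem.Int.mod (k - PySem.Int.mod i k) k) 0 > 0 then
        p.insert (PySem.Int.mod (k - PySem.Int.mod i k) k)
          (p.getD (PySem.Int.mod (k - PySem.Int.mod i k) k) 0 - 1)
      else p.insert (PySem.Int.mod i k) (p.getD (PySem.Int.mod i k) 0 + 1)) (PySem.Dict.empty : PySem.Dict Int Int) with hp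
    set r : Int := PySem.Int.mod i k with hr
    set c : Int := PySem.Int.mod (k - r) k with hc
    have hcOf_r : cOf k r = c := by unfold cOf; rw [← hc]
    have hcfix : PySem.Int.mod c k = c := by rw [hc]; exact mod_idem _ _ hk
    have hcOf_c : cOf k c = r := by rw [← hcOf_r]; exact cOf_cOf k r hk hrfix
    have hresfix : ∀ x ∈ res, PySem.Int.mod x k = x := by
      rw [hres]; intro x hx
      obtain ⟨j, _, rfl⟩ := List.mem_map.mp hx
      exact mod_idem j k hk
    by_cases hbr : p.getD c 0 > 0
    · rw [if_pos hbr, PySem.Dict.getD_insert]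
      rw [ih c] at hbr
      by_cases hvc : v = c
      · rw [if_pos hvc, ih c, hvc]
        by_cases hcr : c = r
        · have hself : cOf k r = r := by rw [hcOf_r, hcr]
          rw [hcr] at hbr ⊢
          unfold pend at hbr ⊢
          rw [if_pos hself] at hbr ⊢
          rw [count_app_self res r]
          omega
        · have hnsc : cOf k c ≠ c := by rw [hcOf_c]; exact fun h => hcr h.symm
          unfold pend at hbr ⊢
          rw [if_neg hnsc] at hbr ⊢
          rw [hcOf_c] at hbr ⊢
          rw [count_app_ne res r c hcr, count_app_self res r]
          omega
      · rw [if_neg hvc, ih v]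
        by_cases hvr : v = r
        · rw [hvr] at hvc ⊢
          have hcr : c ≠ r := fun h => hvc h.symm
          have hnsr : cOf k r ≠ r := by rw [hcOf_r]; exact hcr
          have hnsc : cOf k c ≠ c := by rw [hcOf_c]; exact fun h => hcr h.symm
          unfold pend at hbr ⊢
          rw [if_neg hnsr] at ⊢
          rw [if_neg hnsc, hcOf_c] at hbr
          rw [hcOf_r]
          rw [count_app_self res r, count_app_ne res r c hcr]
          omega
        · exact (pend_append_other k hk res hresfix r v hvr (by rw [hcOf_r]; exact fun h => hvc h.symm)).symm
    · rw [if_neg hbr, PySem.Dict.getD_insert]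
      rw [ih c] at hbr
      by_cases hvr : v = r
      · rw [if_pos hvr, ih r, hvr]
        by_cases hcr : c = r
        · have hself : cOf k r = r := by rw [hcOf_r, hcr]
          rw [hcr] at hbr
          unfold pend at hbr ⊢
          rw [if_pos hself] at hbr ⊢
          rw [count_app_self res r]
          omega
        · have hnsr : cOf k r ≠ r := by rw [hcOf_r]; exact hcr
          have hnsc : cOf k c ≠ c := by rw [hcOf_c]; exact fun h => hcr h.symm
          unfold pend at hbr ⊢
          rw [if_neg hnsr] at ⊢
          rw [if_neg hnsc, hcOf_c] at hbr
          rw [hcOf_r]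
          rw [count_app_self res r, count_app_ne res r c hcr]
          omega
      · rw [if_neg hvr, ih v]
        by_cases hvc : v = c
        · rw [hvc] at hvr ⊢
          have hcr : c ≠ r := hvr
          have hnsc : cOf k c ≠ c := by rw [hcOf_c]; exact fun h => hcr h.symm
          unfold pend at hbr ⊢
          rw [if_neg hnsc, hcOf_c] at hbr ⊢
          rw [count_app_ne res r c hcr, count_app_self res r]
          omega
        · exact (pend_append_other k hk res hresfix r v hvr (by rw [hcOf_r]; exact fun h => hvc h.symm)).symm

lemma values_all_zero (p : PySem.Dict Int Int) (hnd : p.keys.Nodup) :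
    (p.values.all (fun v => v == 0)) = true ↔ ∀ v, p.getD v 0 = 0 := by
  constructor
  · intro h v
    rw [PySem.Dict.getD_eq_get?_getD]
    cases hg : p.get? v with
    | none => rfl
    | some w =>
      have hm := PySem.Dict.mem_items_of_get?_eq_some p hg
      have : w ∈ p.values := by
        have : p.values = p.items.map (·.2) := rfl
        rw [this]; exact List.mem_map.mpr ⟨(v, w), hm, rfl⟩
      have := (List.all_eq_true.mp h) w this
      simpa using this
  · intro h
    rw [List.all_eq_true]
    intro w hw
    have : p.values = p.items.map (·.2) := rfl
    rw [this] at hw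
    obtain ⟨⟨kk, ww⟩, hmem, rfl⟩ := List.mem_map.mp hw
    have hg := PySem.Dict.get?_of_mem_items p hmem hnd
    have := h kk
    rw [PySem.Dict.getD_eq_get?_getD, hg] at this
    simpa using this

-- ---- the central combinatorial equivalence ----
lemma main_iff (k : Int) (hk : k ≠ 0) (res : List Int)
    (hres : ∀ x ∈ res, PySem.Int.mod x k = x) :
    (∀ r ∈ res, condA (PySem.Dict.counter res) k r = true) ↔ (∀ v, pend res k v = 0) := by
  have hcnt : ∀ w, (PySem.Dict.counter res).getD w 0 = ((res.count w : Nat) : Int) :=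
    fun w => PySem.Dict.getD_counter res w
  have hm2 : ∀ n : Int, PySem.Int.mod n 2 = n % 2 := fun n =>
    PySem.Int.mod_eq_emod_of_pos (by norm_num)
  constructor
  · intro hA v
    by_cases hvmem : v ∈ res
    · have hfix := hres v hvmem
      have hcA := hA v hvmem
      unfold condA at hcA
      unfold pend
      by_cases hv0 : v = 0
      · subst hv0
        rw [if_pos rfl] at hcA
        rw [if_pos (cOf_zero k hk)]
        rw [hcnt 0, hm2] at hcA
        simpa using hcA
      · rw [if_neg hv0] at hcA
        by_cases hhalf : PySem.Int.mod k 2 = 0 ∧ v = PySem.Int.floordiv k 2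
        · have hk2 : k = 2 * v := (half_iff k v).mp hhalf
          have hself : cOf k v = v := by
            unfold cOf; rw [show k - v = v by omega]; exact hfix
          rw [if_pos hhalf] at hcA
          rw [if_pos hself]
          rw [hcnt v, hm2] at hcA
          simpa using hcA
        · rw [if_neg hhalf] at hcA
          have hcnz : cOf k v = k - v := cOf_nonzero k v hk hfix hv0
          have hns : cOf k v ≠ v := by
            rw [hcnz]; intro he
            exact hhalf ((half_iff k v).mpr (by omega))
          rw [if_neg hns, hcnz]
          by_cases hcon : (PySem.Dict.counter res).contains (k - v) = true
          · rw [if_pos hcon] at hcA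
            rw [hcnt v, hcnt (k - v)] at hcA
            simp only [decide_eq_true_eq] at hcA
            omega
          · rw [if_neg hcon] at hcA
            exact absurd hcA (by simp)
    · exact pend_not_mem res k v hvmem
  · intro hB r hrmem
    have hfix := hres r hrmem
    unfold condA
    by_cases h0 : r = 0
    · subst h0
      rw [if_pos rfl]
      have hB0 := hB 0
      unfold pend at hB0
      rw [if_pos (cOf_zero k hk)] at hB0
      rw [hcnt 0, hm2]
      simpa using hB0
    · rw [if_neg h0]
      by_cases hhalf : PySem.Int.mod k 2 = 0 ∧ r = PySem.Int.floordiv k 2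
      · have hk2 : k = 2 * r := (half_iff k r).mp hhalf
        have hself : cOf k r = r := by
          unfold cOf; rw [show k - r = r by omega]; exact hfix
        rw [if_pos hhalf]
        have hBr := hB r
        unfold pend at hBr
        rw [if_pos hself] at hBr
        rw [hcnt r, hm2]
        simpa using hBr
      · rw [if_neg hhalf]
        have hcnz : cOf k r = k - r := cOf_nonzero k r hk hfix h0
        have hns : cOf k r ≠ r := by
          rw [hcnz]; intro he
          exact hhalf ((half_iff k r).mpr (by omega))
        have hBr := hB r
        unfold pend at hBr
        rw [if_neg hns, hcnz] at hBr
        have h1 : ((res.count r : Nat) : Int) ≤ ((res.count (k - r) : Nat) : Int) := by omega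
        have hmemkr : (k - r) ∈ res := by
          have hc1 : 0 < res.count r := List.count_pos_iff.mpr hrmem
          have hc2 : 0 < res.count (k - r) := by omega
          exact List.count_pos_iff.mp hc2
        have hBkr := hB (k - r)
        unfold pend at hBkr
        have hckr : cOf k (k - r) = r := by rw [← hcnz]; exact cOf_cOf k r hk hfix
        have hns2 : cOf k (k - r) ≠ (k - r) := by
          rw [hckr]; intro he
          exact hns (by rw [hcnz]; omega)
        rw [if_neg hns2, hckr] at hBkr
        have h2 : ((res.count (k - r) : Nat) : Int) ≤ ((res.count r : Nat) : Int) := by omega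
        have hcon : (PySem.Dict.counter res).contains (k - r) = true := by
          rw [PySem.Dict.contains_counter]
          simpa using hmemkr
        rw [if_pos hcon]
        rw [hcnt r, hcnt (k - r)]
        simp only [decide_eq_true_eq]
        omega

-- ===== VERDICT (by name: the statement is the Claim_ definition above) =====
theorem canPair_spec : Claim_equal_canPair := by
  intro nums k _ hpre
  unfold Spec_canPair canPair canPair_alt
  by_cases hg : nums.length < 4 ∨ nums.sum < 2 * k
  · simp [hg]
  · have hk : k ≠ 0 := by
      rcases hpre with h | h | h
      · exact h
      · exact absurd (Or.inl h) hg
      · intro hk0; subst hk0; exact hg (Or.inr (by simpa using h))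
    simp only [if_neg hg]
    rw [dA_eq_counter nums k, checkKeys_eq_all, PySem.Dict.keys_counter]
    rw [Bool.eq_iff_iff, List.all_eq_true]
    have hres : ∀ x ∈ nums.map (fun i => PySem.Int.mod i k), PySem.Int.mod x k = x := by
      intro x hx
      obtain ⟨i, _, rfl⟩ := List.mem_map.mp hx
      exact mod_idem i k hk
    constructor
    · intro h
      apply (values_all_zero _ (pending_nodup k nums)).mpr
      intro v
      rw [pending_getD k hk nums v]
      exact (main_iff k hk _ hres).mp
        (fun r hr => h r ((PySem.Set.mem_ofList _ _).mpr hr)) v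
    · intro h r hr
      refine (main_iff k hk _ hres).mpr ?_ r ((PySem.Set.mem_ofList _ _).mp hr)
      intro v
      rw [← pending_getD k hk nums v]
      exact (values_all_zero _ (pending_nodup k nums)).mp h v
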